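-- pv_equiv track=rewrite | github.com/kshitijm45/skill-bridge | backend/services/fallback_service.py | _order_by_prerequisites
-- ===== SOURCE A (Python) =====
-- def _order_by_prerequisites(gaps: list[str], skills_present: list[str], taxonomy: dict) -> list[str]:
--     """
--     Topological sort: skills whose prerequisites are already met (present or earlier in list)
--     come before skills that depend on them.
--     """
--     ordered = []
--     remaining = list(gaps)
--     resolved = set(skills_present)
--
--     max_iterations = len(remaining) * 2  # prevent infinite loop on circular deps
--     iteration = 0
--
--     while remaining and iteration < max_iterations:
--         iteration += 1
--         progress = False
--         for skill in list(remaining):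
--             prereqs = taxonomy.get(skill, {}).get("prerequisites", [])
--             unmet = [p for p in prereqs if p not in resolved and p not in ordered]
--             if not unmet:
--                 ordered.append(skill)
--                 resolved.add(skill)
--                 remaining.remove(skill)
--                 progress = True
--         if not progress:
--             # Circular dependency or all remaining have unmet prereqs — just append them
--             ordered.extend(remaining)
--             break
--
--     return ordered
-- ===== SOURCE B (Python) =====
-- def _order_by_prerequisites(gaps: list[str], skills_present: list[str], taxonomy: dict) -> list[str]:
--     resolved = set(skills_present)
--     needs = []          # per gap index: distinct prerequisites not already resolved
--     dependents = {}     # prerequisite name -> indices of gaps waiting on it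
--     for i, skill in enumerate(gaps):
--         prereqs = taxonomy.get(skill, {}).get("prerequisites", [])
--         need = [p for p in dict.fromkeys(prereqs) if p not in resolved]
--         needs.append(need)
--         for p in need:
--             dependents.setdefault(p, []).append(i)
--     unmet = {i: len(need) for i, need in enumerate(needs)}
--     ordered = []
--     remaining = list(range(len(gaps)))
--     while remaining:
--         nxt = []
--         for i in remaining:
--             if unmet[i] == 0:
--                 skill = gaps[i]
--                 ordered.append(skill)
--                 if skill not in resolved:
--                     resolved.add(skill)
--                     for j in dependents.get(skill, []):
--                         unmet[j] -= 1
--             else: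
--                 nxt.append(i)
--         if len(nxt) == len(remaining):
--             for i in nxt:
--                 ordered.append(gaps[i])
--             break
--         remaining = nxt
--     return ordered
-- ===== Notes on version B (the rewrite author's own statement) =====
-- stated objective: faster
-- what changed: A rescans every remaining skill's full prerequisite list each sweep and tests each prerequisite against the growing ordered list; B precomputes per-skill distinct-unmet counters and a prerequisite->dependents index once, so each sweep only tests a counter for zero and each dependency edge is decremented exactly once when its prerequisite resolves.
import Mathlib
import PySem

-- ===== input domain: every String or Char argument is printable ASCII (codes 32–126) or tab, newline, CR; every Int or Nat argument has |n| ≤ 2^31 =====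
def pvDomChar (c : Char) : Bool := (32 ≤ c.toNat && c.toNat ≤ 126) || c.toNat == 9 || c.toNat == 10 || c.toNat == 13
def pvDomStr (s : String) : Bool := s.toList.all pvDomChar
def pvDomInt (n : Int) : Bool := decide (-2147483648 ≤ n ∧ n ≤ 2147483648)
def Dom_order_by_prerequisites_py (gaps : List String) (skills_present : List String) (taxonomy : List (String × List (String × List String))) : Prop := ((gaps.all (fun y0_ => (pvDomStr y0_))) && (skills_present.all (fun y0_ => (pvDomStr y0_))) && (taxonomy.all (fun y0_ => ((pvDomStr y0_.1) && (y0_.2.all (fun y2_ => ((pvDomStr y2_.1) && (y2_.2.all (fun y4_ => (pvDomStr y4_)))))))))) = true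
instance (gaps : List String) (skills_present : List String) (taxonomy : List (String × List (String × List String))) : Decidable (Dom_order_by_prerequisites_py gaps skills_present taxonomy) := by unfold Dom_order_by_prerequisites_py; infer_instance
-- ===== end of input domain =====

-- B replaces A's pass-and-rescan (recomputing every skill's unmet prerequisites and membership in the
-- growing `ordered` list on every sweep) with precomputed distinct-unmet counters plus a
-- prerequisite→dependents index, so each sweep tests a counter and each dependency edge is decremented once.

-- taxonomy.get(skill, {}).get("prerequisites", [])  (shared lookup helper)
def pvPrereq (taxonomy : List (String × List (String × List String))) (s : String) : List String :=
  PySem.Dict.getD (PySem.Dict.mk (PySem.Dict.getD (PySem.Dict.mk taxonomy) s [])) "prerequisites" []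

-- ===== PORT A =====
-- inner 'for skill in list(remaining)' loop; state (ordered, resolved, remaining, progress)
def pvAPass (taxonomy : List (String × List (String × List String))) (snapshot : List String)
    (ordered : List String) (resolved : PySem.Set String) (remaining : List String) (progress : Bool) :
    List String × PySem.Set String × List String × Bool :=
  match snapshot with
  | [] => (ordered, resolved, remaining, progress)
  | skill :: rest =>
    let prereqs := pvPrereq taxonomy skill
    let unmet := prereqs.filter (fun p => !(PySem.Set.contains resolved p) && !(ordered.contains p))
    if unmet = [] then
      -- remaining.remove(skill): skill is always a member of remaining here, Python never raises
      pvAPass taxonomy rest (ordered ++ [skill]) (PySem.Set.add resolved skill)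
        ((PySem.List.remove? remaining skill).getD remaining) true
    else
      pvAPass taxonomy rest ordered resolved remaining progress

-- 'while remaining and iteration < max_iterations' with fuel = max_iterations - iteration
def pvALoop (taxonomy : List (String × List (String × List String))) (fuel : Nat)
    (ordered : List String) (resolved : PySem.Set String) (remaining : List String) : List String :=
  match fuel with
  | 0 => ordered
  | f + 1 =>
    if remaining.isEmpty then ordered
    else
      match pvAPass taxonomy remaining ordered resolved remaining false with
      | (o, r, rem, progress) =>
        if progress then pvALoop taxonomy f o r rem
        else o ++ rem  -- ordered.extend(remaining); break

def order_by_prerequisites_py (gaps : List String) (skills_present : List String) (taxonomy : List (String × List (String × List String))) : List String :=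
  pvALoop taxonomy (2 * gaps.length) [] (PySem.Set.ofList skills_present) gaps

-- ===== PORT B =====
-- [p for p in dict.fromkeys(prereqs) if p not in resolved]
def pvNeed (taxonomy : List (String × List (String × List String))) (resolved0 : PySem.Set String) (s : String) : List String :=
  (PySem.List.dedup (pvPrereq taxonomy s)).filter (fun q => !(PySem.Set.contains resolved0 q))

-- first for-loop of B: builds (needs, dependents); indices 0..n-1 are Nats (Python ints here are ≥ 0)
def pvBIndex (taxonomy : List (String × List (String × List String))) (resolved0 : PySem.Set String)
    (gaps : List String) : List (List String) × PySem.Dict String (List Nat) :=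
  (List.range gaps.length).foldl
    (fun st i =>
      let need := pvNeed taxonomy resolved0 (gaps.getD i "")  -- gaps[i], i always in range
      (st.1 ++ [need],
       -- dependents.setdefault(p, []).append(i)
       need.foldl (fun d q => PySem.Dict.modify d q [] (fun l => l ++ [i])) st.2))
    ([], PySem.Dict.empty)

-- inner 'for i in remaining' loop of B
def pvBPass (gaps : List String) (dependents : PySem.Dict String (List Nat)) :
    List Nat → List Nat → List String → PySem.Set String → PySem.Dict Nat Int →
    List Nat × List String × PySem.Set String × PySem.Dict Nat Int
  | [], nxt, ordered, resolved, unmet => (nxt, ordered, resolved, unmet)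
  | i :: rest, nxt, ordered, resolved, unmet =>
    if PySem.Dict.getD unmet i 0 = 0 then  -- unmet[i]: i is always a key of unmet, Python never raises
      let skill := gaps.getD i ""  -- gaps[i], i always in range
      let ru :=
        if PySem.Set.contains resolved skill then (resolved, unmet)
        else (PySem.Set.add resolved skill,
              -- for j in dependents.get(skill, []): unmet[j] -= 1   (j always a key of unmet)
              (PySem.Dict.getD dependents skill []).foldl
                (fun u j => PySem.Dict.modify u j 0 (fun v => v - 1)) unmet)
      pvBPass gaps dependents rest nxt (ordered ++ [skill]) ru.1 ru.2
    else
      pvBPass gaps dependents rest (nxt ++ [i]) ordered resolved unmet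

-- nxt collects a subset of remaining (needed for termination of pvBLoop)
theorem pvBPass_nxt_len (gaps : List String) (dependents : PySem.Dict String (List Nat))
    (rem nxt : List Nat) (ordered : List String) (resolved : PySem.Set String) (unmet : PySem.Dict Nat Int) :
    (pvBPass gaps dependents rem nxt ordered resolved unmet).1.length ≤ nxt.length + rem.length := by
  induction rem generalizing nxt ordered resolved unmet with
  | nil => simp [pvBPass]
  | cons i rest ih =>
    simp only [pvBPass]
    split
    all_goals refine le_trans (ih ..) ?_
    all_goals simp only [List.length_append, List.length_cons, List.length_nil]
    all_goals omega

-- 'while remaining' loop of B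
def pvBLoop (gaps : List String) (dependents : PySem.Dict String (List Nat))
    (remaining : List Nat) (ordered : List String) (resolved : PySem.Set String)
    (unmet : PySem.Dict Nat Int) : List String :=
  if remaining.isEmpty then ordered
  else
    let r := pvBPass gaps dependents remaining [] ordered resolved unmet
    if h : r.1.length = remaining.length then
      r.2.1 ++ r.1.map (fun i => gaps.getD i "")  -- for i in nxt: ordered.append(gaps[i]); break
    else pvBLoop gaps dependents r.1 r.2.1 r.2.2.1 r.2.2.2
termination_by remaining.length
decreasing_by
  have hle := pvBPass_nxt_len gaps dependents remaining [] ordered resolved unmet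
  simp only [List.length_nil, Nat.zero_add] at hle
  have h' : ¬ (pvBPass gaps dependents remaining [] ordered resolved unmet).1.length
      = remaining.length := h
  show (pvBPass gaps dependents remaining [] ordered resolved unmet).1.length < remaining.length
  omega

def order_by_prerequisites_py_alt (gaps : List String) (skills_present : List String) (taxonomy : List (String × List (String × List String))) : List String :=
  let resolved := PySem.Set.ofList skills_present
  let nd := pvBIndex taxonomy resolved gaps
  -- unmet = {i: len(needs[i]) for i in range(len(gaps))}
  let unmet := (List.range gaps.length).foldl
    (fun d i => PySem.Dict.insert d i ((nd.1.getD i []).length : Int)) PySem.Dict.empty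
  pvBLoop gaps nd.2 (List.range gaps.length) [] resolved unmet

-- ===== PRECONDITION & SPEC =====
-- Pre_ excludes gap lists with duplicate entries: there A removes skills by VALUE (list.remove picks the
-- first equal occurrence, possibly not the one being processed), so the relative order of later duplicate
-- emissions is an accident of A's implementation — a defensible-corner artefact no caller would specify.
def Pre_order_by_prerequisites_py (gaps : List String) (skills_present : List String) (taxonomy : List (String × List (String × List String))) : Prop :=
  gaps.Nodup
instance (gaps : List String) (skills_present : List String) (taxonomy : List (String × List (String × List String))) : Decidable (Pre_order_by_prerequisites_py gaps skills_present taxonomy) := by unfold Pre_order_by_prerequisites_py; infer_instance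

def pvWitness_order_by_prerequisites_py : List String × List String × (List (String × List (String × List String))) :=
  (["b", "a"], ["x"], [("a", [("prerequisites", ["b"])])])

def Spec_order_by_prerequisites_py (gaps : List String) (skills_present : List String) (taxonomy : List (String × List (String × List String))) (out : List String) : Prop := out = order_by_prerequisites_py_alt gaps skills_present taxonomy
instance (gaps : List String) (skills_present : List String) (taxonomy : List (String × List (String × List String))) (out : List String) : Decidable (Spec_order_by_prerequisites_py gaps skills_present taxonomy out) := by unfold Spec_order_by_prerequisites_py; infer_instance

-- ===== CLAIM (what is proved, stated in full; the proofs are below) =====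
def Claim_equal_order_by_prerequisites_py : Prop := ∀ (gaps : List String) (skills_present : List String) (taxonomy : List (String × List (String × List String))), Dom_order_by_prerequisites_py gaps skills_present taxonomy → Pre_order_by_prerequisites_py gaps skills_present taxonomy → Spec_order_by_prerequisites_py gaps skills_present taxonomy (order_by_prerequisites_py gaps skills_present taxonomy)

-- ===== LEMMAS AND PROOFS =====

-- Reference pass: one left-to-right sweep emitting every skill whose prerequisites are all resolved,
-- threading the resolved set; returns (emitted, kept, resolved').
def pvRefPass (tax : List (String × List (String × List String))) :
    List String → PySem.Set String → List String × List String × PySem.Set String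
  | [], res => ([], [], res)
  | s :: t, res =>
    if (pvPrereq tax s).all (fun p => PySem.Set.contains res p) then
      ((s :: (pvRefPass tax t (PySem.Set.add res s)).1, (pvRefPass tax t (PySem.Set.add res s)).2))
    else
      (((pvRefPass tax t res).1, s :: (pvRefPass tax t res).2.1, (pvRefPass tax t res).2.2))

theorem pvRefPass_perm (tax : List (String × List (String × List String))) (rem : List String)
    (res : PySem.Set String) :
    ((pvRefPass tax rem res).1 ++ (pvRefPass tax rem res).2.1).Perm rem := by
  induction rem generalizing res with
  | nil => simp [pvRefPass]
  | cons s t ih =>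
    rw [pvRefPass]
    split
    · simpa using (ih (PySem.Set.add res s)).cons s
    · exact (List.perm_middle.trans ((ih res).cons s))

theorem pvRefPass_res_char (tax : List (String × List (String × List String))) (rem : List String)
    (res : PySem.Set String) (p : String) :
    p ∈ (pvRefPass tax rem res).2.2 ↔ p ∈ res ∨ p ∈ (pvRefPass tax rem res).1 := by
  induction rem generalizing res with
  | nil => simp [pvRefPass]
  | cons s t ih =>
    rw [pvRefPass]
    split
    · simp only [List.mem_cons]
      rw [ih]
      simp [PySem.Set.mem_add]
      tauto
    · exact ih res

theorem pvRefPass_emit_nil (tax : List (String × List (String × List String))) (rem : List String)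
    (res : PySem.Set String) (h : (pvRefPass tax rem res).1 = []) :
    (pvRefPass tax rem res).2.1 = rem := by
  induction rem generalizing res with
  | nil => simp [pvRefPass]
  | cons s t ih =>
    by_cases hc : ((pvPrereq tax s).all (fun p => PySem.Set.contains res p)) = true
    · rw [pvRefPass, if_pos hc] at h
      simp at h
    · rw [pvRefPass, if_neg hc] at h ⊢
      show s :: (pvRefPass tax t res).2.1 = s :: t
      rw [ih res h]

theorem pvRefPass_len (tax : List (String × List (String × List String))) (rem : List String)
    (res : PySem.Set String) :
    (pvRefPass tax rem res).1.length + (pvRefPass tax rem res).2.1.length = rem.length := by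
  have := (pvRefPass_perm tax rem res).length_eq
  simpa using this

-- the repeat-until-no-progress loop over pvRefPass; on stall returns the stalled remainder itself
def pvRefLoop (tax : List (String × List (String × List String))) (rem : List String)
    (res : PySem.Set String) : List String :=
  if h : (pvRefPass tax rem res).1 = [] then rem
  else (pvRefPass tax rem res).1 ++ pvRefLoop tax (pvRefPass tax rem res).2.1 (pvRefPass tax rem res).2.2
termination_by rem.length
decreasing_by
  have hl := pvRefPass_len tax rem res
  cases he : (pvRefPass tax rem res).1 with
  | nil => exact absurd he h
  | cons a l => rw [he] at hl; simp only [List.length_cons] at hl; omega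

-- A's unmet-filter test equals the all-prerequisites-resolved test (ordered ⊆ resolved)
theorem pvA_check (tax : List (String × List (String × List String))) (res : PySem.Set String)
    (ordered : List String) (s : String) (hord : ∀ p ∈ ordered, p ∈ res) :
    ((pvPrereq tax s).filter (fun p => !(PySem.Set.contains res p) && !(ordered.contains p)) = [])
      ↔ ((pvPrereq tax s).all (fun p => PySem.Set.contains res p) = true) := by
  rw [List.filter_eq_nil_iff, List.all_eq_true]
  constructor
  · intro h p hp
    have := h p hp
    simp only [Bool.and_eq_true, Bool.not_eq_true', Bool.not_eq_true] at this
    rcases not_and_or.mp this with h1 | h1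
    · simpa using h1
    · have : p ∈ ordered := by
        simpa [List.contains_iff_mem] using h1
      exact (PySem.Set.contains_iff res p).mpr (hord p this)
  · intro h p hp hcontra
    simp only [Bool.and_eq_true, Bool.not_eq_true'] at hcontra
    rw [h p hp] at hcontra
    simp at hcontra

-- s not in kept ⇒ remaining.remove(s) deletes exactly the occurrence being processed
theorem pv_remove_middle (kept t : List String) (s : String) (hk : s ∉ kept) :
    PySem.List.remove? (kept ++ s :: t) s = some (kept ++ t) := by
  induction kept with
  | nil => simp [PySem.List.remove?, List.idxOf?_cons]
  | cons a k ih =>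
    simp only [List.mem_cons, not_or] at hk
    have hne : a ≠ s := fun h => hk.1 h.symm
    have hih := ih hk.2
    simp only [PySem.List.remove?] at hih ⊢
    rw [List.cons_append, List.idxOf?_cons]
    rw [if_neg (by simpa using hne)]
    cases hm : List.idxOf? s (k ++ s :: t) with
    | none => rw [hm] at hih; simp at hih
    | some m =>
      rw [hm] at hih
      simp only [Option.map_some, Option.some.injEq] at hih
      simp only [Option.map_map, Option.map_some, Option.some.injEq, Function.comp]
      rw [List.eraseIdx_cons_succ, hih]
      simp

-- the inner 'for skill in list(remaining)' of A is one reference sweep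
theorem pvAPass_eq (tax : List (String × List (String × List String))) (snapshot : List String) :
    ∀ (kept ordered : List String) (res : PySem.Set String) (prog : Bool),
    (kept ++ snapshot).Nodup → (∀ p ∈ ordered, p ∈ res) →
    pvAPass tax snapshot ordered res (kept ++ snapshot) prog =
      (ordered ++ (pvRefPass tax snapshot res).1, (pvRefPass tax snapshot res).2.2,
       kept ++ (pvRefPass tax snapshot res).2.1,
       prog || !(pvRefPass tax snapshot res).1.isEmpty) := by
  induction snapshot with
  | nil => intro kept ordered res prog _ _; simp [pvAPass, pvRefPass]
  | cons s t ih =>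
    intro kept ordered res prog hnd hord
    simp only [pvAPass, pvRefPass]
    by_cases hc : (pvPrereq tax s).all (fun p => PySem.Set.contains res p) = true
    · rw [if_pos ((pvA_check tax res ordered s hord).mpr hc), if_pos hc]
      have hsk : s ∉ kept := by
        intro hmem
        exact (List.disjoint_of_nodup_append hnd) hmem (List.mem_cons_self ..)
      rw [pv_remove_middle kept t s hsk]
      simp only [Option.getD_some]
      have hnd' : (kept ++ t).Nodup := by
        refine List.Nodup.sublist ?_ hnd
        exact (List.sublist_cons_self s t).append_left kept
      have hord' : ∀ p ∈ ordered ++ [s], p ∈ PySem.Set.add res s := by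
        intro p hp
        rcases List.mem_append.mp hp with h | h
        · exact (PySem.Set.mem_add ..).mpr (Or.inl (hord p h))
        · simp at h; exact (PySem.Set.mem_add ..).mpr (Or.inr h)
      rw [ih kept (ordered ++ [s]) (PySem.Set.add res s) true hnd' hord']
      simp [List.append_assoc]
    · rw [if_neg (fun hfil => hc ((pvA_check tax res ordered s hord).mp hfil)), if_neg hc]
      have hnd' : ((kept ++ [s]) ++ t).Nodup := by
        rw [← List.append_cons]; exact hnd
      have := ih (kept ++ [s]) ordered res prog hnd' hord
      rw [List.append_assoc] at this
      simpa using this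

-- A's outer while-loop computes the reference loop (fuel is never exhausted)
theorem pvALoop_eq (tax : List (String × List (String × List String))) :
    ∀ (fuel : Nat) (rem ordered : List String) (res : PySem.Set String),
    rem.Nodup → (∀ p ∈ ordered, p ∈ res) → rem.length + 1 ≤ fuel →
    pvALoop tax fuel ordered res rem = ordered ++ pvRefLoop tax rem res := by
  intro fuel
  induction fuel with
  | zero => intro rem ordered res _ _ h; omega
  | succ f ih =>
    intro rem ordered res hnd hord hfuel
    rw [pvALoop]
    by_cases hre : rem = []
    · subst hre
      simp [pvRefLoop, pvRefPass]
    · rw [if_neg (by simpa using hre)]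
      have hpass := pvAPass_eq tax rem [] ordered res false (by simpa using hnd) hord
      simp only [List.nil_append] at hpass
      rw [hpass]
      show (if (false || !(pvRefPass tax rem res).1.isEmpty) = true then
              pvALoop tax f (ordered ++ (pvRefPass tax rem res).1) (pvRefPass tax rem res).2.2
                (pvRefPass tax rem res).2.1
            else (ordered ++ (pvRefPass tax rem res).1) ++ (pvRefPass tax rem res).2.1)
          = ordered ++ pvRefLoop tax rem res
      by_cases he : (pvRefPass tax rem res).1 = []
      · rw [if_neg (show ¬ (false || !(pvRefPass tax rem res).1.isEmpty) = true by simp [he])]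
        rw [pvRefPass_emit_nil tax rem res he]
        rw [pvRefLoop, dif_pos he]
        simp [he]
      · have hcond : (false || !(pvRefPass tax rem res).1.isEmpty) = true := by simp [he]
        have hr : pvRefLoop tax rem res =
            (pvRefPass tax rem res).1 ++
              pvRefLoop tax (pvRefPass tax rem res).2.1 (pvRefPass tax rem res).2.2 := by
          rw [pvRefLoop]
          exact dif_neg he
        rw [if_pos (show (false || !(pvRefPass tax rem res).1.isEmpty) = true by simp [he])]
        have hlen := pvRefPass_len tax rem res
        have hel : 0 < (pvRefPass tax rem res).1.length := List.length_pos_iff.mpr he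
        have hnd2 : (pvRefPass tax rem res).2.1.Nodup := by
          have := (pvRefPass_perm tax rem res).symm.nodup hnd
          exact this.of_append_right
        have hord2 : ∀ p ∈ ordered ++ (pvRefPass tax rem res).1, p ∈ (pvRefPass tax rem res).2.2 := by
          intro p hp
          rcases List.mem_append.mp hp with h | h
          · exact (pvRefPass_res_char tax rem res p).mpr (Or.inl (hord p h))
          · exact (pvRefPass_res_char tax rem res p).mpr (Or.inr h)
        rw [ih _ _ _ hnd2 hord2 (by omega), hr]
        simp [List.append_assoc]


-- ---------- B-side bridge ----------

theorem pvNeed_nodup (tax : List (String × List (String × List String))) (R0 : PySem.Set String)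
    (s : String) : (pvNeed tax R0 s).Nodup :=
  List.Nodup.filter _ (PySem.List.nodup_dedup _)

theorem pvName_inj (gaps : List String) (hg : gaps.Nodup) {i j : Nat} (hi : i < gaps.length)
    (hj : j < gaps.length) (h : gaps.getD i "" = gaps.getD j "") : i = j := by
  rw [List.getD_eq_getElem gaps "" hi, List.getD_eq_getElem gaps "" hj] at h
  exact (List.Nodup.getElem_inj_iff hg).mp h

-- fresh-key insert loops (the unmet-dict comprehension)
theorem pvDict_getD_foldl_insert_not_mem (l : List Nat) (f : Nat → Int) (d : PySem.Dict Nat Int)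
    (j : Nat) (hj : j ∉ l) :
    (l.foldl (fun d i => PySem.Dict.insert d i (f i)) d).getD j 0 = d.getD j 0 := by
  induction l generalizing d with
  | nil => rfl
  | cons i t ih =>
    simp only [List.mem_cons, not_or] at hj
    rw [List.foldl_cons, ih _ hj.2, PySem.Dict.getD_insert, if_neg hj.1]

theorem pvDict_getD_foldl_insert_mem (l : List Nat) (f : Nat → Int) (j : Nat) :
    ∀ (d : PySem.Dict Nat Int), l.Nodup → j ∈ l →
    (l.foldl (fun d i => PySem.Dict.insert d i (f i)) d).getD j 0 = f j := by
  induction l with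
  | nil => intro d _ hj; cases hj
  | cons i t ih =>
    intro d hl hj
    obtain ⟨hin, hnd⟩ := List.nodup_cons.mp hl
    rw [List.foldl_cons]
    rcases List.mem_cons.mp hj with h | h
    · subst h
      rw [pvDict_getD_foldl_insert_not_mem t f _ j hin, PySem.Dict.getD_insert, if_pos rfl]
    · exact ih _ hnd h

-- the decrement loop over a dependents list
theorem pvDict_getD_foldl_sub (L : List Nat) (u : PySem.Dict Nat Int) (k : Nat) :
    (L.foldl (fun u j => PySem.Dict.modify u j 0 (fun v => v - 1)) u).getD k 0
      = u.getD k 0 - (L.count k : Int) := by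
  induction L generalizing u with
  | nil => simp
  | cons i t ih =>
    rw [List.foldl_cons, ih, PySem.Dict.getD_modify, List.count_cons]
    by_cases h : k = i
    · subst h
      rw [if_pos rfl]
      simp only [BEq.rfl, if_true]
      push_cast
      ring
    · have hx : (k == i) = false := by simp [h]
      have hx2 : (i == k) = false := by simp; omega
      rw [if_neg h]
      simp [hx, hx2]

-- the setdefault-append loop over one (deduplicated) need list
theorem pvDict_getD_foldl_dep (i : Nat) (p : String) :
    ∀ (need : List String) (d : PySem.Dict String (List Nat)), need.Nodup →
    (need.foldl (fun d q => PySem.Dict.modify d q [] (fun l => l ++ [i])) d).getD p []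
      = d.getD p [] ++ (if p ∈ need then [i] else []) := by
  intro need
  induction need with
  | nil => intro d _; simp
  | cons q t ih =>
    intro d hnd
    obtain ⟨hq, ht⟩ := List.nodup_cons.mp hnd
    rw [List.foldl_cons, ih _ ht, PySem.Dict.getD_modify]
    by_cases h : p = q
    · subst h
      rw [if_pos rfl, if_neg (fun hm => hq hm), if_pos (List.mem_cons_self ..)]
      simp
    · rw [if_neg h]
      by_cases hm : p ∈ t
      · rw [if_pos hm, if_pos (List.mem_cons.mpr (Or.inr hm))]
      · rw [if_neg hm, if_neg (by simp [h, hm])]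

theorem pvBIndex_fst (tax : List (String × List (String × List String))) (R0 : PySem.Set String)
    (gaps : List String) :
    (pvBIndex tax R0 gaps).1
      = (List.range gaps.length).map (fun i => pvNeed tax R0 (gaps.getD i "")) := by
  unfold pvBIndex
  rw [PySem.List.foldl_prod_mk
        (fun st1 i => st1 ++ [pvNeed tax R0 (gaps.getD i "")])
        (fun st2 i => (pvNeed tax R0 (gaps.getD i "")).foldl
          (fun d q => PySem.Dict.modify d q [] (fun l => l ++ [i])) st2)]
  rw [PySem.List.foldl_append_singleton_eq_map]
  simp

theorem pvBIndex_snd (tax : List (String × List (String × List String))) (R0 : PySem.Set String)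
    (gaps : List String) (p : String) :
    ((pvBIndex tax R0 gaps).2).getD p []
      = (List.range gaps.length).filter (fun i => decide (p ∈ pvNeed tax R0 (gaps.getD i ""))) := by
  unfold pvBIndex
  rw [PySem.List.foldl_prod_mk
        (fun st1 i => st1 ++ [pvNeed tax R0 (gaps.getD i "")])
        (fun st2 i => (pvNeed tax R0 (gaps.getD i "")).foldl
          (fun d q => PySem.Dict.modify d q [] (fun l => l ++ [i])) st2)]
  show ((List.range gaps.length).foldl
      (fun st2 i => (pvNeed tax R0 (gaps.getD i "")).foldl
          (fun d q => PySem.Dict.modify d q [] (fun l => l ++ [i])) st2) PySem.Dict.empty).getD p [] = _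
  have H : ∀ (l : List Nat) (d : PySem.Dict String (List Nat)),
      (l.foldl (fun st2 i => (pvNeed tax R0 (gaps.getD i "")).foldl
          (fun d q => PySem.Dict.modify d q [] (fun l => l ++ [i])) st2) d).getD p []
        = d.getD p [] ++ l.filter (fun i => decide (p ∈ pvNeed tax R0 (gaps.getD i ""))) := by
    intro l
    induction l with
    | nil => intro d; simp
    | cons i t ih =>
      intro d
      rw [List.foldl_cons, ih, pvDict_getD_foldl_dep i p _ d (pvNeed_nodup tax R0 _),
        List.filter_cons]
      by_cases hm : p ∈ pvNeed tax R0 (gaps.getD i "")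
      · rw [if_pos hm, if_pos (by simpa using hm)]
        simp [List.append_assoc]
      · rw [if_neg hm, if_neg (by simpa using hm)]
        simp
  rw [H]
  simp

-- the distinct unmet prerequisites still blocking skill s
def pvCnt (tax : List (String × List (String × List String))) (R0 res : PySem.Set String)
    (s : String) : Nat :=
  ((pvNeed tax R0 s).filter (fun p => !(PySem.Set.contains res p))).length

-- counter invariant: unmet[j] counts skill j's still-unresolved distinct prerequisites
def pvCInv (tax : List (String × List (String × List String))) (R0 : PySem.Set String)
    (gaps : List String) (unmet : PySem.Dict Nat Int) (res : PySem.Set String) : Prop :=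
  ∀ j, j < gaps.length →
    PySem.Dict.getD unmet j 0 = (pvCnt tax R0 res (gaps.getD j "") : Int)

theorem pvB_check (tax : List (String × List (String × List String))) (R0 res : PySem.Set String)
    (s : String) (hR0 : ∀ p ∈ R0, p ∈ res) :
    (pvCnt tax R0 res s = 0)
      ↔ ((pvPrereq tax s).all (fun p => PySem.Set.contains res p) = true) := by
  unfold pvCnt
  rw [List.length_eq_zero_iff, List.filter_eq_nil_iff, List.all_eq_true]
  constructor
  · intro h p hp
    by_cases hr : p ∈ R0
    · exact (PySem.Set.contains_iff res p).mpr (hR0 p hr)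
    · have hpn : p ∈ pvNeed tax R0 s := by
        unfold pvNeed
        rw [List.mem_filter]
        exact ⟨(PySem.List.mem_dedup _ _).mpr hp, by simp [PySem.Set.contains_iff, hr]⟩
      have := h p hpn
      simpa using this
  · intro h p hp hcon
    have hpre : p ∈ pvPrereq tax s := by
      have := (List.mem_filter.mp hp).1
      exact (PySem.List.mem_dedup _ _).mp this
    rw [h p hpre] at hcon
    simp at hcon

-- resolving a new name drops exactly the matching unmet prerequisite
theorem pv_filter_add_len (res : PySem.Set String) (s : String) (hs : s ∉ res) :
    ∀ (l : List String), l.Nodup →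
    ((l.filter (fun p => !(PySem.Set.contains (PySem.Set.add res s) p))).length : Int)
      = ((l.filter (fun p => !(PySem.Set.contains res p))).length : Int)
        - (if s ∈ l then 1 else 0) := by
  intro l
  induction l with
  | nil => simp
  | cons a t ih =>
    intro hnd
    obtain ⟨ha, ht⟩ := List.nodup_cons.mp hnd
    rw [List.filter_cons, List.filter_cons]
    by_cases has : a = s
    · subst has
      have h1 : (!(PySem.Set.contains (PySem.Set.add res a) a)) = false := by
        simp [PySem.Set.contains_iff, PySem.Set.mem_add]
      have h2 : (!(PySem.Set.contains res a)) = true := by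
        simp [PySem.Set.contains_iff, hs]
      rw [h1, h2]
      rw [if_neg (by simp), if_pos rfl, if_pos (List.mem_cons_self ..)]
      rw [ih ht, if_neg ha]
      simp only [List.length_cons]
      push_cast
      ring
    · have hmem : (PySem.Set.contains (PySem.Set.add res s) a) = (PySem.Set.contains res a) := by
        by_cases hc : a ∈ res
        · rw [(PySem.Set.contains_iff (PySem.Set.add res s) a).mpr
              ((PySem.Set.mem_add res s a).mpr (Or.inl hc)),
            (PySem.Set.contains_iff res a).mpr hc]
        · have h1 : (PySem.Set.contains (PySem.Set.add res s) a) = false := by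
            apply Bool.eq_false_iff.mpr
            intro hx
            rcases (PySem.Set.mem_add res s a).mp ((PySem.Set.contains_iff _ a).mp hx) with h' | h'
            · exact hc h'
            · exact has h'
          have h2 : (PySem.Set.contains res a) = false := by
            apply Bool.eq_false_iff.mpr
            intro hx
            exact hc ((PySem.Set.contains_iff res a).mp hx)
          rw [h1, h2]
      rw [hmem]
      by_cases hst : s ∈ t
      · rw [if_pos (List.mem_cons_of_mem a hst)]
        by_cases hcc : (!(PySem.Set.contains res a)) = true
        · rw [if_pos hcc, if_pos hcc]
          simp only [List.length_cons]
          push_cast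
          rw [ih ht, if_pos hst]
          ring
        · rw [if_neg hcc, if_neg hcc, ih ht]
          simp [hst]
      · have hsa : s ∉ a :: t := by
          intro hmm
          rcases List.mem_cons.mp hmm with h | h
          · exact has h.symm
          · exact hst h
        rw [if_neg hsa]
        by_cases hcc : (!(PySem.Set.contains res a)) = true
        · rw [if_pos hcc, if_pos hcc]
          simp only [List.length_cons]
          push_cast
          rw [ih ht, if_neg hst]
          ring
        · rw [if_neg hcc, if_neg hcc, ih ht]
          simp [hst]

-- one inner sweep of B is one reference sweep (tracked through counters)
theorem pvBPass_eq (tax : List (String × List (String × List String))) (R0 : PySem.Set String)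
    (gaps : List String) (hg : gaps.Nodup) :
    ∀ (rem nxt : List Nat) (ordered : List String) (res : PySem.Set String)
      (unmet : PySem.Dict Nat Int),
    rem.Nodup → (∀ i ∈ rem, i < gaps.length) →
    (∀ i ∈ rem, gaps.getD i "" ∈ res → gaps.getD i "" ∈ R0) →
    (∀ p ∈ R0, p ∈ res) →
    pvCInv tax R0 gaps unmet res →
    ∃ restIdx unmet',
      pvBPass gaps (pvBIndex tax R0 gaps).2 rem nxt ordered res unmet
        = (nxt ++ restIdx,
           ordered ++ (pvRefPass tax (rem.map (fun i => gaps.getD i "")) res).1,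
           (pvRefPass tax (rem.map (fun i => gaps.getD i "")) res).2.2,
           unmet') ∧
      restIdx.map (fun i => gaps.getD i "")
        = (pvRefPass tax (rem.map (fun i => gaps.getD i "")) res).2.1 ∧
      restIdx.Sublist rem ∧
      pvCInv tax R0 gaps unmet' (pvRefPass tax (rem.map (fun i => gaps.getD i "")) res).2.2 := by
  intro rem
  induction rem with
  | nil =>
    intro nxt ordered res unmet _ _ _ _ hinv
    exact ⟨[], unmet, by simp [pvBPass, pvRefPass], by simp [pvRefPass], by simp,
      by simpa [pvRefPass] using hinv⟩
  | cons i t ih =>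
    intro nxt ordered res unmet hnd hb hpend hR0 hinv
    obtain ⟨hit, hndt⟩ := List.nodup_cons.mp hnd
    have hi : i < gaps.length := hb i (List.mem_cons_self ..)
    have hcnt := hinv i hi
    by_cases hc : ((pvPrereq tax (gaps.getD i "")).all (fun p => PySem.Set.contains res p)) = true
    · -- skill i is emitted
      have hz : PySem.Dict.getD unmet i 0 = 0 := by
        rw [hcnt, (pvB_check tax R0 res (gaps.getD i "") hR0).mpr hc]
        rfl
      by_cases hctn : PySem.Set.contains res (gaps.getD i "") = true
      · -- already resolved (only possible for names in skills_present): everything unchanged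
        have hadd : PySem.Set.add res (gaps.getD i "") = res := by
          unfold PySem.Set.add
          rw [hctn]
          simp
        have hstep : pvBPass gaps (pvBIndex tax R0 gaps).2 (i :: t) nxt ordered res unmet
            = pvBPass gaps (pvBIndex tax R0 gaps).2 t nxt (ordered ++ [gaps.getD i ""]) res unmet := by
          simp only [pvBPass]
          rw [if_pos hz, if_pos hctn]
        obtain ⟨restIdx, unmet', heq, hmap, hsub, hinv'⟩ :=
          ih nxt (ordered ++ [gaps.getD i ""]) res unmet hndt
            (fun j hj => hb j (List.mem_cons_of_mem _ hj))
            (fun j hj => hpend j (List.mem_cons_of_mem _ hj)) hR0 hinv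
        refine ⟨restIdx, unmet', ?_, ?_, hsub.cons _, ?_⟩
        · rw [hstep, heq, List.map_cons, pvRefPass, if_pos hc, hadd]
          simp [List.append_assoc]
        · rw [List.map_cons, pvRefPass, if_pos hc, hadd]
          exact hmap
        · rw [List.map_cons, pvRefPass, if_pos hc, hadd]
          exact hinv'
      · -- newly resolved: decrement all dependents of this name
        have hsres : gaps.getD i "" ∉ res := by
          intro hmm
          exact absurd ((PySem.Set.contains_iff res _).mpr hmm) (by simpa using hctn)
        have hstep : pvBPass gaps (pvBIndex tax R0 gaps).2 (i :: t) nxt ordered res unmet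
            = pvBPass gaps (pvBIndex tax R0 gaps).2 t nxt (ordered ++ [gaps.getD i ""])
                (PySem.Set.add res (gaps.getD i ""))
                ((PySem.Dict.getD (pvBIndex tax R0 gaps).2 (gaps.getD i "") []).foldl
                  (fun u j => PySem.Dict.modify u j 0 (fun v => v - 1)) unmet) := by
          simp only [pvBPass]
          rw [if_pos hz, if_neg hctn]
        have hinv2 : pvCInv tax R0 gaps
            ((PySem.Dict.getD (pvBIndex tax R0 gaps).2 (gaps.getD i "") []).foldl
              (fun u j => PySem.Dict.modify u j 0 (fun v => v - 1)) unmet)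
            (PySem.Set.add res (gaps.getD i "")) := by
        
          intro j hj
          rw [pvDict_getD_foldl_sub, hinv j hj, pvBIndex_snd]
          have hndr : ((List.range gaps.length).filter
              (fun k => decide ((gaps.getD i "") ∈ pvNeed tax R0 (gaps.getD k "")))).Nodup :=
            List.Nodup.filter _ (List.nodup_range)
          have hcadd : (pvCnt tax R0 (PySem.Set.add res (gaps.getD i "")) (gaps.getD j "") : Int)
              = (pvCnt tax R0 res (gaps.getD j "") : Int)
                - (if (gaps.getD i "") ∈ pvNeed tax R0 (gaps.getD j "") then 1 else 0) := by
            unfold pvCnt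
            rw [pv_filter_add_len res _ hsres _ (pvNeed_nodup tax R0 _)]
          rw [hcadd]
          by_cases hm : (gaps.getD i "") ∈ pvNeed tax R0 (gaps.getD j "")
          · have hjin : j ∈ (List.range gaps.length).filter
                (fun k => decide ((gaps.getD i "") ∈ pvNeed tax R0 (gaps.getD k ""))) := by
              rw [List.mem_filter]
              exact ⟨List.mem_range.mpr hj, by simpa using hm⟩
            rw [List.count_eq_one_of_mem hndr hjin, if_pos hm]
            simp
          · have hjout : j ∉ (List.range gaps.length).filter
                (fun k => decide ((gaps.getD i "") ∈ pvNeed tax R0 (gaps.getD k ""))) := by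
              rw [List.mem_filter]
              intro hcontra
              exact hm (by simpa using hcontra.2)
            rw [List.count_eq_zero.mpr hjout, if_neg hm]
            simp
        have hpend2 : ∀ j ∈ t, gaps.getD j "" ∈ PySem.Set.add res (gaps.getD i "")
            → gaps.getD j "" ∈ R0 := by
          intro j hj hmm
          rcases (PySem.Set.mem_add res _ _).mp hmm with h | h
          · exact hpend j (List.mem_cons_of_mem _ hj) h
          · exact absurd (pvName_inj gaps hg (hb j (List.mem_cons_of_mem _ hj)) hi h)
              (fun he => hit (he ▸ hj))
        have hR02 : ∀ p ∈ R0, p ∈ PySem.Set.add res (gaps.getD i "") :=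
          fun p hp => (PySem.Set.mem_add res _ p).mpr (Or.inl (hR0 p hp))
        obtain ⟨restIdx, unmet', heq, hmap, hsub, hinv'⟩ :=
          ih nxt (ordered ++ [gaps.getD i ""]) (PySem.Set.add res (gaps.getD i ""))
            ((PySem.Dict.getD (pvBIndex tax R0 gaps).2 (gaps.getD i "") []).foldl
              (fun u j => PySem.Dict.modify u j 0 (fun v => v - 1)) unmet)
            hndt (fun j hj => hb j (List.mem_cons_of_mem _ hj)) hpend2 hR02 hinv2
        refine ⟨restIdx, unmet', ?_, ?_, hsub.cons _, ?_⟩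
        · rw [hstep, heq, List.map_cons, pvRefPass, if_pos hc]
          simp [List.append_assoc]
        · rw [List.map_cons, pvRefPass, if_pos hc]
          exact hmap
        · rw [List.map_cons, pvRefPass, if_pos hc]
          exact hinv'
    · -- skill i is kept
      have hnz : ¬ PySem.Dict.getD unmet i 0 = 0 := by
        rw [hcnt]
        intro h0
        exact hc ((pvB_check tax R0 res (gaps.getD i "") hR0).mp (by exact_mod_cast h0))
      have hstep : pvBPass gaps (pvBIndex tax R0 gaps).2 (i :: t) nxt ordered res unmet
          = pvBPass gaps (pvBIndex tax R0 gaps).2 t (nxt ++ [i]) ordered res unmet := by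
        simp only [pvBPass]
        rw [if_neg hnz]
      obtain ⟨restIdx, unmet', heq, hmap, hsub, hinv'⟩ :=
        ih (nxt ++ [i]) ordered res unmet hndt
          (fun j hj => hb j (List.mem_cons_of_mem _ hj))
          (fun j hj => hpend j (List.mem_cons_of_mem _ hj)) hR0 hinv
      refine ⟨i :: restIdx, unmet', ?_, ?_, hsub.cons₂ _, ?_⟩
      · rw [hstep, heq, List.map_cons, pvRefPass, if_neg hc]
        simp [List.append_assoc]
      · conv_rhs => rw [List.map_cons, pvRefPass, if_neg hc]
        rw [List.map_cons]
        show gaps.getD i "" :: List.map (fun i => gaps.getD i "") restIdx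
            = gaps.getD i "" :: (pvRefPass tax (List.map (fun i => gaps.getD i "") t) res).2.1
        rw [hmap]
      · rw [List.map_cons, pvRefPass, if_neg hc]
        exact hinv'

-- B's outer while-loop computes the reference loop
theorem pvBLoop_eq (tax : List (String × List (String × List String))) (R0 : PySem.Set String)
    (gaps : List String) (hg : gaps.Nodup) :
    ∀ (n : Nat) (rem : List Nat) (ordered : List String) (res : PySem.Set String)
      (unmet : PySem.Dict Nat Int), rem.length ≤ n →
    rem.Nodup → (∀ i ∈ rem, i < gaps.length) →
    (∀ i ∈ rem, gaps.getD i "" ∈ res → gaps.getD i "" ∈ R0) →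
    (∀ p ∈ R0, p ∈ res) →
    pvCInv tax R0 gaps unmet res →
    pvBLoop gaps (pvBIndex tax R0 gaps).2 rem ordered res unmet
      = ordered ++ pvRefLoop tax (rem.map (fun i => gaps.getD i "")) res := by
  intro n
  induction n with
  | zero =>
    intro rem ordered res unmet hlen _ _ _ _ _
    have : rem = [] := List.length_eq_zero_iff.mp (Nat.le_zero.mp hlen)
    subst this
    unfold pvBLoop
    simp [pvRefLoop, pvRefPass]
  | succ m ihn =>
    intro rem ordered res unmet hlen hnd hb hpend hR0 hinv
    by_cases hre : rem = []
    · subst hre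
      unfold pvBLoop
      simp [pvRefLoop, pvRefPass]
    · obtain ⟨restIdx, unmet', heq, hmap, hsub, hinv'⟩ :=
        pvBPass_eq tax R0 gaps hg rem [] ordered res unmet hnd hb hpend hR0 hinv
      simp only [List.nil_append] at heq
      unfold pvBLoop
      rw [if_neg (by simpa using hre)]
      simp only [heq]
      have hmaplen := congrArg List.length hmap
      simp only [List.length_map] at hmaplen
      have hplen := pvRefPass_len tax (rem.map (fun i => gaps.getD i "")) res
      have hmlen : (rem.map (fun i => gaps.getD i "")).length = rem.length := List.length_map ..
      by_cases he : (pvRefPass tax (rem.map (fun i => gaps.getD i "")) res).1 = []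
      · have hrlen : restIdx.length = rem.length := by
          rw [hmaplen, pvRefPass_emit_nil tax _ res he, hmlen]
        rw [dif_pos hrlen]
        have hr : pvRefLoop tax (rem.map (fun i => gaps.getD i "")) res
            = rem.map (fun i => gaps.getD i "") := by
          rw [pvRefLoop, dif_pos he]
        rw [hr]
        have hrest : restIdx.map (fun i => gaps.getD i "") = rem.map (fun i => gaps.getD i "") := by
          rw [hmap, pvRefPass_emit_nil tax _ res he]
        rw [he, hrest]
        simp
      · have hel : 0 < (pvRefPass tax (rem.map (fun i => gaps.getD i "")) res).1.length :=
          List.length_pos_iff.mpr he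
        have hrlen : ¬ restIdx.length = rem.length := by omega
        rw [dif_neg hrlen]
        have hnames : (rem.map (fun i => gaps.getD i "")).Nodup :=
          (List.nodup_map_iff_inj_on hnd).mpr
            (fun x hx y hy hxy => pvName_inj gaps hg (hb x hx) (hb y hy) hxy)
        have hnd2 : ((pvRefPass tax (rem.map (fun i => gaps.getD i "")) res).1
            ++ (pvRefPass tax (rem.map (fun i => gaps.getD i "")) res).2.1).Nodup :=
          (pvRefPass_perm tax _ res).symm.nodup hnames
        have hpend2 : ∀ i ∈ restIdx,
            gaps.getD i "" ∈ (pvRefPass tax (rem.map (fun i => gaps.getD i "")) res).2.2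
            → gaps.getD i "" ∈ R0 := by
          intro i hi hmm
          rcases (pvRefPass_res_char tax _ res _).mp hmm with h | h
          · exact hpend i (hsub.mem hi) h
          · exfalso
            have hkept : gaps.getD i ""
                ∈ (pvRefPass tax (rem.map (fun i => gaps.getD i "")) res).2.1 := by
              rw [← hmap]
              exact List.mem_map_of_mem hi
            exact (List.disjoint_of_nodup_append hnd2) h hkept
        have hR02 : ∀ p ∈ R0, p ∈ (pvRefPass tax (rem.map (fun i => gaps.getD i "")) res).2.2 :=
          fun p hp => (pvRefPass_res_char tax _ res p).mpr (Or.inl (hR0 p hp))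
        have hlen2 : restIdx.length ≤ m := by omega
        rw [ihn restIdx (ordered ++ _) _ unmet' hlen2 (hsub.nodup hnd)
          (fun i hi => hb i (hsub.mem hi)) hpend2 hR02 hinv']
        rw [hmap]
        have hr : pvRefLoop tax (rem.map (fun i => gaps.getD i "")) res
            = (pvRefPass tax (rem.map (fun i => gaps.getD i "")) res).1
              ++ pvRefLoop tax (pvRefPass tax (rem.map (fun i => gaps.getD i "")) res).2.1
                  (pvRefPass tax (rem.map (fun i => gaps.getD i "")) res).2.2 := by
          rw [pvRefLoop, dif_neg he]
        rw [hr]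
        simp [List.append_assoc]

theorem pvA_top (gaps skills_present : List String)
    (tax : List (String × List (String × List String))) (hg : gaps.Nodup) :
    order_by_prerequisites_py gaps skills_present tax
      = pvRefLoop tax gaps (PySem.Set.ofList skills_present) := by
  unfold order_by_prerequisites_py
  cases gaps with
  | nil =>
    rw [pvRefLoop]
    simp [pvALoop, pvRefPass]
  | cons a g =>
    have := pvALoop_eq tax (2 * (a :: g).length) (a :: g) []
      (PySem.Set.ofList skills_present) hg (by simp) (by simp only [List.length_cons]; omega)
    simpa using this

theorem pvB_top (gaps skills_present : List String)
    (tax : List (String × List (String × List String))) (hg : gaps.Nodup) :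
    order_by_prerequisites_py_alt gaps skills_present tax
      = pvRefLoop tax gaps (PySem.Set.ofList skills_present) := by
  unfold order_by_prerequisites_py_alt
  have hinv0 : pvCInv tax (PySem.Set.ofList skills_present) gaps
      ((List.range gaps.length).foldl
        (fun d i => PySem.Dict.insert d i
          (((pvBIndex tax (PySem.Set.ofList skills_present) gaps).1.getD i []).length : Int))
        PySem.Dict.empty)
      (PySem.Set.ofList skills_present) := by
    intro j hj
    rw [pvDict_getD_foldl_insert_mem _ _ j _ List.nodup_range (List.mem_range.mpr hj)]
    rw [pvBIndex_fst, PySem.List.getD_map_range _ _ _ _ hj]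
    have : (pvNeed tax (PySem.Set.ofList skills_present) (gaps.getD j "")).filter
        (fun p => !(PySem.Set.contains (PySem.Set.ofList skills_present) p))
        = pvNeed tax (PySem.Set.ofList skills_present) (gaps.getD j "") := by
      apply List.filter_eq_self.mpr
      intro p hp
      exact (List.mem_filter.mp hp).2
    unfold pvCnt
    rw [this]
  have hmain := pvBLoop_eq tax (PySem.Set.ofList skills_present) gaps hg
    gaps.length (List.range gaps.length) [] (PySem.Set.ofList skills_present) _
    (by simp) List.nodup_range (fun i hi => List.mem_range.mp hi)
    (fun i _ h => h) (fun p hp => hp) hinv0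
  rw [hmain]
  have hmr : (List.range gaps.length).map (fun i => gaps.getD i "") = gaps := by
    apply List.ext_getElem (by simp)
    intro n h1 h2
    simp only [List.getElem_map, List.getElem_range]
    rw [List.getD_eq_getElem gaps "" (by simpa using h2)]
  rw [hmr]
  simp

-- ===== VERDICT (by name: the statement is the Claim_ definition above) =====
theorem order_by_prerequisites_py_spec : Claim_equal_order_by_prerequisites_py := by
  intro gaps skills_present taxonomy _ hpre
  unfold Spec_order_by_prerequisites_py
  rw [pvA_top gaps skills_present taxonomy hpre, pvB_top gaps skills_present taxonomy hpre]
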